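-- pv_equiv track=rewrite | github.com/DidierStevens/DidierStevensSuite | emldump.py | ExtraInfoHISTOGRAM
-- ===== SOURCE A (Python) =====
-- def P23Ord(value):
--     if type(value) == int:
--         return value
--     else:
--         return ord(value)
--
-- def CIC(expression):
--     if callable(expression):
--         return expression()
--     else:
--         return expression
--
-- def IFF(expression, valueTrue, valueFalse):
--     if expression:
--         return CIC(valueTrue)
--     else:
--         return CIC(valueFalse)
--
-- def ExtraInfoHISTOGRAM(data):
--     if data == None:
--         return ''
--     dPrevalence = {iter: 0 for iter in range(0x100)}
--     for char in data:
--         dPrevalence[P23Ord(char)] += 1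
--     result = []
--     count = 0
--     minimum = None
--     maximum = None
--     for iter in range(0x100):
--         if dPrevalence[iter] > 0:
--             result.append('0x%02x:%d' % (iter, dPrevalence[iter]))
--             count += 1
--             if minimum == None:
--                 minimum = iter
--             else:
--                 minimum = min(minimum, iter)
--             if maximum == None:
--                 maximum = iter
--             else:
--                 maximum = max(maximum, iter)
--     result.insert(0, '%d' % count)
--     result.insert(1, IFF(minimum == None, '', '0x%02x' % minimum))
--     result.insert(2, IFF(maximum == None, '', '0x%02x' % maximum))
--     return ','.join(result)
-- ===== SOURCE B (Python) =====
-- def P23Ord(value):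
--     if type(value) == int:
--         return value
--     else:
--         return ord(value)
--
-- def ExtraInfoHISTOGRAM(data):
--     if data == None:
--         return ''
--     counter = {}
--     for char in data:
--         b = P23Ord(char)
--         counter[b] = counter.get(b, 0) + 1
--     keys = sorted(counter)
--     fields = ['%d' % len(keys),
--               '0x%02x' % keys[0] if keys else '',
--               '0x%02x' % keys[-1] if keys else '']
--     return ','.join(fields + ['0x%02x:%d' % (k, counter[k]) for k in keys])
-- ===== Notes on version B (the rewrite author's own statement) =====
-- stated objective: simpler
-- what changed: B counts only the bytes that actually occur in one dict and derives count/min/max as len/keys[0]/keys[-1] of the sorted key list, emitting entries by a comprehension, instead of A's 256-slot prevalence table scanned with running count/min/max accumulators.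
-- outside the precondition, e.g. on ExtraInfoHISTOGRAM(''): A raises TypeError, B returns '0,,'
import Mathlib
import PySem

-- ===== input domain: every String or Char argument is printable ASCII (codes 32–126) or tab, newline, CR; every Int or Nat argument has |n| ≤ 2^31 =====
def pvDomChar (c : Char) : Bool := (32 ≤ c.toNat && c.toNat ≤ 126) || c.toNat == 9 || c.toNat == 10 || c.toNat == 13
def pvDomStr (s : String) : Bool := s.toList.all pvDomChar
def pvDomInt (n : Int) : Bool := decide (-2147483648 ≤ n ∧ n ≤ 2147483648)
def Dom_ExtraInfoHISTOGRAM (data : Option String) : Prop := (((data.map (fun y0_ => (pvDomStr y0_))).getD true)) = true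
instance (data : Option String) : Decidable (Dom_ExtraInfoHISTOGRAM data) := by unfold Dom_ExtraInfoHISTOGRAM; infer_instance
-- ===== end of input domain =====

-- B derives count/min/max from the sorted list of occurring byte values instead of a 256-slot
-- scan with running accumulators (objective: simpler). Equivalence of return values is proved
-- on Pre_ (data ≠ some ""): on the empty string the Python A raises TypeError while B returns
-- the empty histogram (zero count, empty min/max fields).

-- ===== PORT A =====
-- P23Ord applied to a character (the only way both programs call it): ord(c)
def P23Ord (c : Char) : Int := (c.toNat : Int)

-- one lowercase hex digit
def hexDigit (n : Nat) : Char := if n < 10 then Char.ofNat (48 + n) else Char.ofNat (87 + n)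

-- Python's 0x-prefixed two-digit lowercase hex of i — exact for 0 ≤ i < 256, the only
-- values either program formats (byte codes)
def hex02 (i : Int) : String := String.ofList ['0', 'x', hexDigit (i.toNat / 16 % 16), hexDigit (i.toNat % 16)]

-- the body of A's 'for iter in range(0x100)' loop; state = (result, count, minimum, maximum)
def histStep (cnt : Int → Int) (st : List String × Int × Option Int × Option Int) (i : Int) :
    List String × Int × Option Int × Option Int :=
  if cnt i > 0 then
    (st.1 ++ [hex02 i ++ ":" ++ PySem.Int.toStr (cnt i)],
     st.2.1 + 1,
     (match st.2.2.1 with | none => some i | some m => some (min m i)),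
     (match st.2.2.2 with | none => some i | some m => some (max m i)))
  else st

def ExtraInfoHISTOGRAM (data : Option String) : String :=
  match data with
  | none => ""
  | some s =>
    let d0 : PySem.Dict Int Int :=
      (PySem.List.pyRange 0 256 1).foldl (fun d i => d.insert i 0) PySem.Dict.empty
    let dPrev := s.toList.foldl (fun d c => d.modify (P23Ord c) 0 (· + 1)) d0
    let st := (PySem.List.pyRange 0 256 1).foldl (histStep (fun i => dPrev.getD i 0)) ([], 0, none, none)
    let result := PySem.List.insert st.1 0 (PySem.Int.toStr st.2.1)
    let result := PySem.List.insert result 1 (match st.2.2.1 with | none => "" | some m => hex02 m)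
    let result := PySem.List.insert result 2 (match st.2.2.2 with | none => "" | some m => hex02 m)
    PySem.Str.join "," result

-- ===== PORT B =====
def ExtraInfoHISTOGRAM_alt (data : Option String) : String :=
  match data with
  | none => ""
  | some s =>
    let counter : PySem.Dict Int Int :=
      s.toList.foldl (fun d c => d.insert (P23Ord c) (d.getD (P23Ord c) 0 + 1)) PySem.Dict.empty
    let keys := PySem.List.sorted counter.keys (fun k => k)
    let fields := [PySem.Int.toStr (keys.length : Int),
                   (match keys.head? with | none => "" | some k => hex02 k),
                   (match keys.getLast? with | none => "" | some k => hex02 k)]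
    PySem.Str.join "," (fields ++ keys.map (fun k => hex02 k ++ ":" ++ PySem.Int.toStr (counter.getD k 0)))

-- ===== PRECONDITION & SPEC =====
-- Pre_ excludes only data = some "": there A raises TypeError (the hex formatting of the
-- still-None minimum is evaluated eagerly as an argument of IFF); B returns the empty
-- histogram there (see claim.json "cites").
def Pre_ExtraInfoHISTOGRAM (data : Option String) : Prop := data ≠ some ""
instance (data : Option String) : Decidable (Pre_ExtraInfoHISTOGRAM data) := by
  unfold Pre_ExtraInfoHISTOGRAM; infer_instance

def pvWitness_ExtraInfoHISTOGRAM : Option String := some "ab"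

def Spec_ExtraInfoHISTOGRAM (data : Option String) (out : String) : Prop :=
  out = ExtraInfoHISTOGRAM_alt data
instance (data : Option String) (out : String) : Decidable (Spec_ExtraInfoHISTOGRAM data out) := by
  unfold Spec_ExtraInfoHISTOGRAM; infer_instance

-- ===== CLAIM (what is proved, stated in full; the proofs are below) =====
def Claim_equal_ExtraInfoHISTOGRAM : Prop :=
  ∀ (data : Option String), Dom_ExtraInfoHISTOGRAM data → Pre_ExtraInfoHISTOGRAM data →
    Spec_ExtraInfoHISTOGRAM data (ExtraInfoHISTOGRAM data)

-- ===== LEMMAS AND PROOFS =====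

-- the 256-key zero dictionary always reads as 0
lemma getD_foldl_insert_zero (is : List Int) (d : PySem.Dict Int Int) (k : Int)
    (h : d.getD k 0 = 0) :
    (is.foldl (fun d i => d.insert i 0) d).getD k 0 = 0 := by
  induction is generalizing d with
  | nil => exact h
  | cons i t ih =>
    refine ih _ ?_
    rw [PySem.Dict.getD_insert]
    split <;> simp [h]

-- A's range-256 loop, characterised: starting from the state a kept prefix ks0 left behind,
-- it appends exactly the kept elements of is; min stays the head, max becomes the last.
lemma hist_loop (cnt : Int → Int) (is : List Int) (ks0 : List Int)
    (hsorted : is.Pairwise (· < ·))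
    (hgt : ∀ i ∈ is, ∀ k ∈ ks0, k < i) :
    is.foldl (histStep cnt)
      (ks0.map (fun i => hex02 i ++ ":" ++ PySem.Int.toStr (cnt i)),
       (ks0.length : Int), ks0.head?, ks0.getLast?)
    = ((ks0 ++ is.filter (fun i => cnt i > 0)).map
         (fun i => hex02 i ++ ":" ++ PySem.Int.toStr (cnt i)),
       ((ks0 ++ is.filter (fun i => cnt i > 0)).length : Int),
       (ks0 ++ is.filter (fun i => cnt i > 0)).head?,
       (ks0 ++ is.filter (fun i => cnt i > 0)).getLast?) := by
  induction is generalizing ks0 with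
  | nil => simp
  | cons i t ih =>
    obtain ⟨hlt, htail⟩ := List.pairwise_cons.mp hsorted
    have hi : ∀ k ∈ ks0, k < i := fun k hk => hgt i List.mem_cons_self k hk
    rw [List.foldl_cons]
    by_cases hp : cnt i > 0
    · have hstep : histStep cnt
          (ks0.map (fun i => hex02 i ++ ":" ++ PySem.Int.toStr (cnt i)),
           (ks0.length : Int), ks0.head?, ks0.getLast?) i
          = ((ks0 ++ [i]).map (fun i => hex02 i ++ ":" ++ PySem.Int.toStr (cnt i)),
             ((ks0 ++ [i]).length : Int), (ks0 ++ [i]).head?, (ks0 ++ [i]).getLast?) := by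
        simp only [histStep, if_pos hp]
        refine Prod.ext ?_ (Prod.ext ?_ (Prod.ext ?_ ?_))
        · simp
        · simp
        · cases ks0 with
          | nil => simp
          | cons a t0 =>
            simp [min_eq_left (le_of_lt (hi a List.mem_cons_self))]
        · rcases h0 : ks0.getLast? with _ | m
          · have : ks0 = [] := List.getLast?_eq_none_iff.mp h0
            simp [this]
          · have hm : m ∈ ks0 := List.mem_of_getLast? h0
            simp [max_eq_right (le_of_lt (hi m hm))]
      rw [hstep, ih (ks0 ++ [i]) htail ?hgt']
      case hgt' =>
        intro j hj k hk
        rcases List.mem_append.mp hk with hk | hk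
        · exact hgt j (List.mem_cons_of_mem _ hj) k hk
        · rw [List.mem_singleton.mp hk]; exact hlt j hj
      rw [List.filter_cons_of_pos (by simpa using hp)]
      simp
    · have hstep : ∀ st, histStep cnt st i = st := by
        intro st; simp [histStep, hp]
      rw [hstep, ih ks0 htail (fun j hj k hk => hgt j (List.mem_cons_of_mem _ hj) k hk),
        List.filter_cons_of_neg (by simpa using hp)]

-- B's sorted key list = A's ascending scan of [0,256) restricted to occurring values
lemma keys_eq (ords : List Int) (hb : ∀ x ∈ ords, 0 ≤ x ∧ x < 256) :
    PySem.List.sorted (PySem.Set.ofList ords) (fun k => k)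
      = (PySem.List.pyRange 0 256 1).filter (fun i => ((ords.count i : Int) > 0)) := by
  apply PySem.List.sorted_eq_of_perm_of_pairwise_lt
  · apply (List.perm_ext_iff_of_nodup ((PySem.List.nodup_pyRange_one 0 256).filter _)
      (PySem.Set.nodup_ofList ords)).mpr
    intro x
    simp only [List.mem_filter, PySem.List.mem_pyRange_one, PySem.Set.mem_ofList,
      decide_eq_true_eq]
    constructor
    · rintro ⟨_, hc⟩
      have : 0 < ords.count x := by exact_mod_cast hc
      exact List.count_pos_iff.mp this
    · intro hx
      refine ⟨⟨(hb x hx).1, (hb x hx).2⟩, ?_⟩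
      have : 0 < ords.count x := List.count_pos_iff.mpr hx
      exact_mod_cast this
  · exact (PySem.List.pairwise_lt_pyRange_one 0 256).filter _

-- ===== VERDICT (by name: the statement is the Claim_ definition above) =====
theorem ExtraInfoHISTOGRAM_spec : Claim_equal_ExtraInfoHISTOGRAM := by
  intro data hdom _hpre
  unfold Spec_ExtraInfoHISTOGRAM
  cases data with
  | none => rfl
  | some s =>
    simp only [ExtraInfoHISTOGRAM, ExtraInfoHISTOGRAM_alt]
    -- the multiset of byte values
    set ords : List Int := s.toList.map P23Ord with hords
    -- A's prevalence counts
    have hcnt : (fun i => ((s.toList.foldl (fun d c => d.modify (P23Ord c) 0 (· + 1))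
        ((PySem.List.pyRange 0 256 1).foldl (fun d i => d.insert i 0) PySem.Dict.empty)).getD i 0))
        = (fun i => ((ords.count i : Int))) := by
      funext i
      have h := PySem.Dict.getD_foldl_modify_add_one (s.toList.map P23Ord)
        ((PySem.List.pyRange 0 256 1).foldl (fun d i => d.insert i 0) PySem.Dict.empty) i
      rw [List.foldl_map] at h
      rw [h, getD_foldl_insert_zero _ _ _ (by simp [PySem.Dict.getD_empty])]
      simp [hords]
    -- B's counter
    have hcounter : s.toList.foldl
        (fun d c => d.insert (P23Ord c) (d.getD (P23Ord c) 0 + 1)) PySem.Dict.empty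
        = PySem.Dict.counter ords := by
      have h := PySem.Dict.foldl_insert_getD_add_one_eq_counter (s.toList.map P23Ord)
      rw [List.foldl_map] at h
      rw [hords]
      exact h
    -- bounds from the domain
    have hb : ∀ x ∈ ords, 0 ≤ x ∧ x < 256 := by
      intro x hx
      rw [hords] at hx
      obtain ⟨c, hc, rfl⟩ := List.mem_map.mp hx
      have hdc : pvDomChar c = true := by
        have : s.toList.all pvDomChar = true := hdom
        exact List.all_eq_true.mp this c hc
      simp only [pvDomChar, Bool.or_eq_true, Bool.and_eq_true, decide_eq_true_eq,
        beq_iff_eq] at hdc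
      unfold P23Ord
      omega
    have hkeys : PySem.List.sorted (PySem.Dict.counter ords).keys (fun k => k)
        = (PySem.List.pyRange 0 256 1).filter (fun i => ((ords.count i : Int) > 0)) := by
      rw [PySem.Dict.keys_counter]
      exact keys_eq ords hb
    set ks : List Int := (PySem.List.pyRange 0 256 1).filter (fun i => ((ords.count i : Int) > 0))
      with hks
    have hloop := hist_loop (fun i => ((ords.count i : Int))) (PySem.List.pyRange 0 256 1) []
      (PySem.List.pairwise_lt_pyRange_one 0 256) (by simp)
    simp only [List.map_nil, List.length_nil, List.head?_nil,
      List.getLast?_nil, List.nil_append, Nat.cast_zero] at hloop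
    rw [hcnt, hloop, hcounter, hkeys, ← hks]
    -- now both sides are built from ks; reduce the three inserts
    have h1 : PySem.List.insert
        (ks.map (fun i => hex02 i ++ ":" ++ PySem.Int.toStr ((ords.count i : Int)))) 0
        (PySem.Int.toStr (ks.length : Int))
        = PySem.Int.toStr (ks.length : Int)
          :: ks.map (fun i => hex02 i ++ ":" ++ PySem.Int.toStr ((ords.count i : Int))) :=
      PySem.List.insert_zero _ _
    rw [h1]
    rw [PySem.List.insert_ofNat _ 1 _ (by simp)]
    norm_num [List.take_succ_cons, List.drop_succ_cons]
    rw [PySem.List.insert_ofNat _ 2 _ (by simp)]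
    norm_num [List.take_succ_cons, List.drop_succ_cons]
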